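-- pv_equiv track=rewrite | github.com/codminge/CodingTest | 프로그래머스/0/181918. 배열 만들기 4/배열 만들기 4.py | solution
-- ===== SOURCE A (Python) =====
-- def solution(arr):
--     stk = []
--     arridx = len(arr)
--     i = 0
--     while i < arridx:
--         stkidx = len(stk)
--         if stkidx == 0:
--             stk.append(arr[i])
--             i = i + 1
--         else:
--             if stk[stkidx-1] < arr[i]:
--                 stk.append(arr[i])
--                 i = i + 1
--             else:
--                 stk.remove(stk[stkidx-1])
--     return stk
-- ===== SOURCE B (Python) =====
-- def solution(arr):
--     out = []
--     m = None
--     for x in reversed(arr):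
--         if m is None or x < m:
--             out.append(x)
--             m = x
--     out.reverse()
--     return out
-- ===== Notes on version B (the rewrite author's own statement) =====
-- stated objective: faster
-- what changed: Replaces A's monotonic stack (index-driven while loop that pops via stk.remove) with a stack-free right-to-left scan keeping a running minimum: an element survives iff it is strictly smaller than every later element, so B collects the record minima of the reversed array and reverses the result.
import Mathlib
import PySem

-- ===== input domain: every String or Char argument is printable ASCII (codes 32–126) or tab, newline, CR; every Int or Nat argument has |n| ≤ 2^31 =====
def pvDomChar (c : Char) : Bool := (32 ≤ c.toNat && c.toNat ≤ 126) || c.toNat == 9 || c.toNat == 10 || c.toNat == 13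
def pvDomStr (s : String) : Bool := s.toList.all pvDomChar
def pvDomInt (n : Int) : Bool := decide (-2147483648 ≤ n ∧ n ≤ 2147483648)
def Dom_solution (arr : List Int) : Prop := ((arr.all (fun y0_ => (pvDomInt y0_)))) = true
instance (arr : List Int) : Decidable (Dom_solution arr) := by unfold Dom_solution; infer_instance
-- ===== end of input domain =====

-- B replaces A's monotonic stack entirely: a right-to-left scan keeping a running
-- minimum returns exactly the elements strictly smaller than all later ones.

-- ===== PORT A =====
-- stk[stkidx-1], Python's top of the stack (stkidx > 0 at this point in A)
def pyTop (stk : List Int) : Int :=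
  (PySem.List.pyGet? stk ((stk.length : Int) - 1)).getD 0

theorem pyTop_eq_getLast (stk : List Int) (hne : stk ≠ []) :
    pyTop stk = stk.getLast hne := by
  have hlen : 0 < stk.length := List.length_pos_iff.mpr hne
  have hidx : ((stk.length : Int) - 1) = ((stk.length - 1 : Nat) : Int) := by omega
  have hlt : stk.length - 1 < stk.length := by omega
  rw [pyTop, hidx, PySem.List.pyGet?_natCast]
  simp [List.getElem?_eq_getElem hlt]
  exact (List.getLast_eq_getElem hne).symm

-- removing the top strictly shrinks the stack (for termination of A's loop)
theorem removeTop_length (stk : List Int) (hne : stk ≠ []) :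
    ((PySem.List.remove? stk (pyTop stk)).getD stk).length < stk.length := by
  have hmem : pyTop stk ∈ stk := by
    rw [pyTop_eq_getLast stk hne]; exact List.getLast_mem hne
  rw [PySem.List.remove?_eq_some_erase stk _ hmem, Option.getD_some,
    List.length_erase_of_mem hmem]
  have : 0 < stk.length := List.length_pos_iff.mpr hne
  omega

-- A's while-loop: state (stk, i); i advances only on a push, a pop keeps i fixed.
-- (The Python locals arridx/stkidx are the lengths written inline here.)
-- arr[i] is read only under i < len(arr) and stk[stkidx-1] only under stkidx > 0,
-- so the pyGet?/remove? options are always `some`; .getD is never the default.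
def solutionLoop (arr : List Int) (stk : List Int) (i : Nat) : List Int :=
  if _h : i < arr.length then
    if stk.length = 0 then
      solutionLoop arr (stk ++ [(PySem.List.pyGet? arr (i : Int)).getD 0]) (i + 1)
    else
      if pyTop stk < (PySem.List.pyGet? arr (i : Int)).getD 0 then
        solutionLoop arr (stk ++ [(PySem.List.pyGet? arr (i : Int)).getD 0]) (i + 1)
      else
        solutionLoop arr ((PySem.List.remove? stk (pyTop stk)).getD stk) i
  else stk
termination_by 2 * (arr.length - i) + stk.length
decreasing_by
  · simp; omega
  · simp; omega
  · have hne : stk ≠ [] := by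
      intro h; subst h; simp at *
    have := removeTop_length stk hne
    omega

def solution (arr : List Int) : List Int :=
  solutionLoop arr [] 0

-- ===== PORT B =====
-- Source B: out = []; m = None; for x in reversed(arr): if m is None or x < m: append x, m = x;
-- out.reverse(); return out
def solution_alt (arr : List Int) : List Int :=
  (arr.reverse.foldl
    (fun (p : List Int × Option Int) x =>
      match p.2 with
      | none => (p.1 ++ [x], some x)
      | some m => if x < m then (p.1 ++ [x], some x) else p)
    ([], none)).1.reverse

-- ===== PRECONDITION & SPEC =====
def Spec_solution (arr : List Int) (out : List Int) : Prop := out = solution_alt arr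
instance (arr : List Int) (out : List Int) : Decidable (Spec_solution arr out) := by unfold Spec_solution; infer_instance

-- ===== CLAIM (what is proved, stated in full; the proofs are below) =====
def Claim_equal_solution : Prop := ∀ (arr : List Int), Dom_solution arr → Spec_solution arr (solution arr)

-- ===== LEMMAS AND PROOFS =====

-- structural core of B's loop over the (already reversed) list
def bscan : List Int → Option Int → List Int
  | [], _ => []
  | x :: l, none => x :: bscan l (some x)
  | x :: l, some m => if x < m then x :: bscan l (some x) else bscan l (some m)

theorem foldl_eq_bscan (l : List Int) : ∀ (out : List Int) (m : Option Int),
    (l.foldl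
      (fun (p : List Int × Option Int) x =>
        match p.2 with
        | none => (p.1 ++ [x], some x)
        | some m => if x < m then (p.1 ++ [x], some x) else p)
      (out, m)).1 = out ++ bscan l m := by
  induction l with
  | nil => intro out m; simp [bscan]
  | cons x l ih =>
    intro out m
    cases m with
    | none => simp [bscan, ih]
    | some m =>
      by_cases h : x < m
      · simp [bscan, h, ih]
      · simp [bscan, h, ih]

theorem solution_alt_eq_bscan (arr : List Int) :
    solution_alt arr = (bscan arr.reverse none).reverse := by
  unfold solution_alt
  rw [foldl_eq_bscan]
  simp

-- every element bscan keeps under threshold m is < m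
theorem mem_bscan_lt (l : List Int) : ∀ (m z : Int), z ∈ bscan l (some m) → z < m := by
  induction l with
  | nil => intro m z h; simp [bscan] at h
  | cons x l ih =>
    intro m z h
    by_cases hx : x < m
    · simp [bscan, hx] at h
      rcases h with h | h
      · omega
      · exact lt_trans (ih x z h) hx
    · simp [bscan, hx] at h
      exact ih m z h

-- lowering the threshold = filtering the kept record minima
theorem bscan_some_filter (l : List Int) : ∀ (x y : Int), x ≤ y →
    (bscan l (some y)).filter (· < x) = bscan l (some x) := by
  induction l with
  | nil => intro x y _; simp [bscan]
  | cons z l ih =>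
    intro x y hxy
    by_cases hzy : z < y
    · by_cases hzx : z < x
      · have hall : (bscan l (some z)).filter (· < x) = bscan l (some z) := by
          apply List.filter_eq_self.mpr
          intro a ha
          have := mem_bscan_lt l z a ha
          simp; omega
        simp [bscan, hzy, hzx, hall]
      · simp [bscan, hzy, hzx, ih x z (by omega)]
    · have hzx : ¬ z < x := by omega
      simp [bscan, hzy, hzx, ih x y hxy]
  
theorem bscan_none_filter (l : List Int) : ∀ (x : Int),
    (bscan l none).filter (· < x) = bscan l (some x) := by
  induction l with
  | nil => intro x; simp [bscan]
  | cons z l ih =>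
    intro x
    by_cases hzx : z < x
    · have hall : (bscan l (some z)).filter (· < x) = bscan l (some z) := by
        apply List.filter_eq_self.mpr
        intro a ha
        have := mem_bscan_lt l z a ha
        simp; omega
      simp [bscan, hzx, hall]
    · simp [bscan, hzx, bscan_some_filter l x z (by omega)]

-- B's result on arr ++ [x]: keep the previous survivors that are < x, then x
theorem alt_snoc (arr : List Int) (x : Int) :
    solution_alt (arr ++ [x]) = (solution_alt arr).filter (· < x) ++ [x] := by
  rw [solution_alt_eq_bscan, solution_alt_eq_bscan]
  simp only [List.reverse_append, List.reverse_cons, List.reverse_nil, List.nil_append,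
    List.singleton_append]
  show (x :: bscan arr.reverse (some x)).reverse = _
  rw [← bscan_none_filter, List.reverse_cons, ← List.filter_reverse]

-- ----- A's loop = the monotonic-stack fold -----
-- inner pop loop of the classical stack formulation (proof-side only)
def popGE (stk : List Int) (x : Int) : List Int :=
  match _e : stk.getLast? with
  | none => stk
  | some v => if x ≤ v then popGE stk.dropLast x else stk
termination_by stk.length
decreasing_by
  have : stk ≠ [] := by intro h; subst h; simp at _e
  have : 0 < stk.length := List.length_pos_iff.mpr this
  simp [List.length_dropLast]
  omega

theorem popGE_nil (x : Int) : popGE [] x = [] := by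
  rw [popGE]
  rfl

theorem popGE_of_getLast?_lt (stk : List Int) (x v : Int) (h : stk.getLast? = some v)
    (hlt : v < x) : popGE stk x = stk := by
  rw [popGE]
  split
  · rfl
  · rename_i v' h'
    rw [h] at h'
    cases h'
    rw [if_neg (not_le.mpr hlt)]

theorem popGE_of_getLast?_ge (stk : List Int) (x v : Int) (h : stk.getLast? = some v)
    (hge : x ≤ v) : popGE stk x = popGE stk.dropLast x := by
  rw [popGE]
  split
  · rename_i h'; rw [h] at h'; cases h'
  · rename_i v' h'
    rw [h] at h'
    cases h'
    rw [if_pos hge]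

-- erasing the last element of a nodup list drops it
theorem erase_getLast_of_nodup (ys : List Int) (v : Int) (hnd : (ys ++ [v]).Nodup) :
    (ys ++ [v]).erase v = ys := by
  have hv : v ∉ ys := by
    rw [List.nodup_append] at hnd
    exact fun h => hnd.2.2 v h v (by simp) rfl
  rw [List.erase_append_right _ hv]
  simp

-- strict increase is preserved by pushing a strictly larger element
theorem pairwise_push (stk : List Int) (x : Int) (hp : stk.Pairwise (· < ·))
    (hx : ∀ y ∈ stk, y < x) : (stk ++ [x]).Pairwise (· < ·) := by
  rw [List.pairwise_append]
  exact ⟨hp, List.pairwise_singleton _ _, by intro a ha b hb; simp at hb; subst hb; exact hx a ha⟩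

theorem pairwise_lt_getLast (stk : List Int) (hne : stk ≠ [])
    (hp : stk.Pairwise (· < ·)) : ∀ y ∈ stk.dropLast, y < stk.getLast hne := by
  intro y hy
  have hdec : stk.dropLast ++ [stk.getLast hne] = stk := List.dropLast_concat_getLast hne
  rw [← hdec, List.pairwise_append] at hp
  exact hp.2.2 y hy _ (by simp)

-- removing the top of a strictly increasing nonempty stack is dropLast
theorem removeTop_eq_dropLast (stk : List Int) (hne : stk ≠ [])
    (hp : stk.Pairwise (· < ·)) :
    (PySem.List.remove? stk (pyTop stk)).getD stk = stk.dropLast := by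
  have hmem : pyTop stk ∈ stk := by
    rw [pyTop_eq_getLast stk hne]; exact List.getLast_mem hne
  rw [PySem.List.remove?_eq_some_erase stk _ hmem, Option.getD_some,
    pyTop_eq_getLast stk hne]
  have hdec : stk.dropLast ++ [stk.getLast hne] = stk := List.dropLast_concat_getLast hne
  have hnd : stk.Nodup := hp.nodup
  have h2 := erase_getLast_of_nodup stk.dropLast (stk.getLast hne) (by rw [hdec]; exact hnd)
  rw [hdec] at h2
  exact h2

-- A's loop computes the monotonic-stack fold over the remaining elements
theorem solutionLoop_eq_foldl (arr : List Int) :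
    ∀ (m : Nat) (stk : List Int) (i : Nat), 2 * (arr.length - i) + stk.length ≤ m →
      i ≤ arr.length → stk.Pairwise (· < ·) →
      solutionLoop arr stk i = (arr.drop i).foldl (fun s x => popGE s x ++ [x]) stk := by
  intro m
  induction m with
  | zero =>
    intro stk i hm hi _
    have hi' : i = arr.length := by omega
    have hstk : stk = [] := by
      cases stk with
      | nil => rfl
      | cons a l => exfalso; simp only [List.length_cons] at hm; omega
    subst hi' hstk
    rw [solutionLoop, dif_neg (by omega)]
    simp
  | succ m ih =>
    intro stk i hm hi hp
    by_cases h : i < arr.length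
    · have hx : (PySem.List.pyGet? arr (i : Int)).getD 0 = arr[i] := by
        rw [PySem.List.pyGet?_natCast]
        simp [List.getElem?_eq_getElem h]
      have hdrop : arr.drop i = arr[i] :: arr.drop (i + 1) := List.drop_eq_getElem_cons h
      cases hstk : stk with
      | nil =>
        subst hstk
        rw [solutionLoop, dif_pos h, if_pos (by simp), hx]
        rw [ih ([] ++ [arr[i]]) (i + 1)
          (by simp only [List.length_append, List.length_cons, List.length_nil]; omega)
          (by omega) (by simp)]
        rw [hdrop, List.foldl_cons, popGE_nil]
      | cons a l =>
        have hne : stk ≠ [] := by rw [hstk]; exact List.cons_ne_nil a l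
        have hlen : stk.length ≠ 0 := by
          simp [List.length_eq_zero_iff]; exact hne
        have htop : pyTop stk = stk.getLast hne := pyTop_eq_getLast stk hne
        have hlast? : stk.getLast? = some (stk.getLast hne) := List.getLast?_eq_some_getLast hne
        rw [← hstk]
        by_cases hcmp : stk.getLast hne < arr[i]
        · -- push branch
          rw [solutionLoop, dif_pos h, if_neg hlen, htop, hx, if_pos hcmp]
          have hall : ∀ y ∈ stk, y < arr[i] := by
            intro y hy
            have hdec : stk.dropLast ++ [stk.getLast hne] = stk := List.dropLast_concat_getLast hne
            rw [← hdec] at hy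
            rcases List.mem_append.mp hy with h1 | h1
            · exact lt_trans (pairwise_lt_getLast stk hne hp y h1) hcmp
            · simp at h1; rw [h1]; exact hcmp
          rw [ih (stk ++ [arr[i]]) (i + 1)
            (by simp only [List.length_append, List.length_cons, List.length_nil]; omega)
            (by omega) (pairwise_push stk _ hp hall)]
          rw [hdrop]
          simp only [List.foldl_cons]
          rw [popGE_of_getLast?_lt stk _ _ hlast? hcmp]
        · -- pop branch
          rw [not_lt] at hcmp
          rw [solutionLoop, dif_pos h, if_neg hlen, htop, hx, if_neg (not_lt.mpr hcmp)]
          have hrem : (PySem.List.remove? stk (stk.getLast hne)).getD stk = stk.dropLast := by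
            rw [← htop]; exact removeTop_eq_dropLast stk hne hp
          rw [hrem]
          have hp' : stk.dropLast.Pairwise (· < ·) :=
            List.Pairwise.sublist (List.dropLast_sublist stk) hp
          have hlens : stk.dropLast.length < stk.length := by
            have : 0 < stk.length := List.length_pos_iff.mpr hne
            simp [List.length_dropLast]; omega
          rw [ih stk.dropLast i (by omega) hi hp']
          rw [hdrop]
          simp only [List.foldl_cons]
          rw [popGE_of_getLast?_ge stk _ _ hlast? hcmp]
    · have hi' : i = arr.length := by omega
      rw [solutionLoop, dif_neg (by omega)]
      simp [hi']

-- on a strictly increasing stack, popping tops ≥ x keeps exactly the prefix < x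
theorem popGE_eq_filter (stk : List Int) (hp : stk.Pairwise (· < ·)) (x : Int) :
    popGE stk x = stk.filter (· < x) := by
  induction hk : stk.length using Nat.strong_induction_on generalizing stk with
  | _ n ih =>
  cases hlast : stk.getLast? with
  | none =>
    have : stk = [] := List.getLast?_eq_none_iff.mp hlast
    subst this
    simp [popGE_nil]
  | some v =>
    have hne : stk ≠ [] := by
      intro h; subst h; simp at hlast
    have hv : v = stk.getLast hne := by
      have := List.getLast?_eq_some_getLast hne
      rw [hlast] at this; cases this; rfl
    by_cases hcmp : v < x
    · rw [popGE_of_getLast?_lt stk x v hlast hcmp]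
      symm
      apply List.filter_eq_self.mpr
      intro a ha
      have hdec : stk.dropLast ++ [stk.getLast hne] = stk := List.dropLast_concat_getLast hne
      rw [← hdec] at ha
      rcases List.mem_append.mp ha with h1 | h1
      · have := pairwise_lt_getLast stk hne hp a h1
        simp; omega
      · simp at h1; subst h1; rw [← hv]; simp; omega
    · rw [popGE_of_getLast?_ge stk x v hlast (by omega)]
      have hdec : stk.dropLast ++ [stk.getLast hne] = stk := List.dropLast_concat_getLast hne
      have hp' : stk.dropLast.Pairwise (· < ·) :=
        List.Pairwise.sublist (List.dropLast_sublist stk) hp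
      have hlens : stk.dropLast.length < n := by
        have : 0 < stk.length := List.length_pos_iff.mpr hne
        simp [List.length_dropLast]; omega
      rw [ih stk.dropLast.length hlens stk.dropLast hp' rfl]
      conv_rhs => rw [← hdec]
      rw [List.filter_append]
      have : ¬ (stk.getLast hne < x) := by rw [← hv]; omega
      simp [this]

-- B's result is strictly increasing (needed to run the snoc recurrences in parallel)
theorem alt_pairwise (arr : List Int) : (solution_alt arr).Pairwise (· < ·) := by
  induction arr using List.reverseRecOn with
  | nil =>
    have : solution_alt [] = [] := by rfl
    rw [this]; exact List.Pairwise.nil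
  | append_singleton arr x ih =>
    rw [alt_snoc]
    apply pairwise_push
    · exact List.Pairwise.sublist (List.filter_sublist) ih
    · intro y hy
      have := List.of_mem_filter hy
      simpa using this

-- the fold and B satisfy the same snoc recurrence, hence agree
theorem fold_eq_alt (arr : List Int) :
    arr.foldl (fun s x => popGE s x ++ [x]) [] = solution_alt arr := by
  induction arr using List.reverseRecOn with
  | nil => rfl
  | append_singleton arr x ih =>
    rw [List.foldl_append, List.foldl_cons, List.foldl_nil, ih, alt_snoc,
      popGE_eq_filter _ (alt_pairwise arr) x]

-- ===== VERDICT (by name: the statement is the Claim_ definition above) =====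
theorem solution_spec : Claim_equal_solution := by
  intro arr _
  unfold Spec_solution solution
  rw [solutionLoop_eq_foldl arr (2 * arr.length) [] 0 (by simp) (by omega) (by simp)]
  simp [fold_eq_alt]
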